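-- pv_equiv track=rewrite | github.com/xuc865/SkillRL-main | agent_system/memory/retrieval_memory.py | _extract_planning_pattern
-- ===== SOURCE A (Python) =====
-- from typing import List, Dict, Any, Tuple, Optional
--
-- def _extract_planning_pattern(trajectory: List[Dict]) -> str:
--     """
--     Extract a high-level planning pattern from a successful trajectory.
--     Returns a string like "Search [Location] → Acquire [Object] → Navigate → Place"
--     """
--     # Simple heuristic: extract action types in sequence
--     action_types = []
--     for step in trajectory:
--         action = step.get('action', '').lower()
--
--         # Categorize action types
--         if 'go to' in action or 'navigate' in action:
--             if 'Navigate' not in action_types: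
--                 action_types.append('Navigate')
--         elif 'take' in action or 'pick' in action or 'grab' in action:
--             if 'Acquire' not in action_types:
--                 action_types.append('Acquire')
--         elif 'put' in action or 'place' in action or 'move' in action:
--             if 'Place' not in action_types:
--                 action_types.append('Place')
--         elif 'open' in action:
--             if 'Open' not in action_types:
--                 action_types.append('Open')
--         elif 'use' in action or 'turn on' in action:
--             if 'Use' not in action_types:
--                 action_types.append('Use')
--         elif 'search' in action or 'look' in action or 'examine' in action:
--             if 'Search' not in action_types:
--                 action_types.append('Search')
--
--     # Create pattern string
--     if action_types:
--         pattern = " → ".join(action_types)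
--         return pattern
--     else:
--         return "Unknown pattern"
-- ===== SOURCE B (Python) =====
-- CATS = [
--     ('Navigate', ('go to', 'navigate')),
--     ('Acquire', ('take', 'pick', 'grab')),
--     ('Place', ('put', 'place', 'move')),
--     ('Open', ('open',)),
--     ('Use', ('use', 'turn on')),
--     ('Search', ('search', 'look', 'examine')),
-- ]
--
--
-- def _extract_planning_pattern(trajectory):
--     # Category-major scan: for each category (priority order), find the index of the
--     # first step it claims -- a step belongs to the highest-priority category whose
--     # keyword occurs in it.  Then order the claimed categories by that first index.
--     actions = [step.get('action', '').lower() for step in trajectory]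
--     firsts = []
--     for j, (name, kws) in enumerate(CATS):
--         for i, a in enumerate(actions):
--             if any(k in a for k in kws) and not any(
--                     k in a for _, prior in CATS[:j] for k in prior):
--                 firsts.append((i, name))
--                 break
--     if not firsts:
--         return "Unknown pattern"
--     return " → ".join(name for _, name in sorted(firsts, key=lambda p: p[0]))
-- ===== Notes on version B (the rewrite author's own statement) =====
-- stated objective: alternative
-- what changed: Replaced A's step-major pass (classify each step via an elif chain and append unseen categories in encounter order) by a category-major algorithm: for each category in priority order find the index of the first step it claims, then sort the claimed categories by that first index and join.
import Mathlib
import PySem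

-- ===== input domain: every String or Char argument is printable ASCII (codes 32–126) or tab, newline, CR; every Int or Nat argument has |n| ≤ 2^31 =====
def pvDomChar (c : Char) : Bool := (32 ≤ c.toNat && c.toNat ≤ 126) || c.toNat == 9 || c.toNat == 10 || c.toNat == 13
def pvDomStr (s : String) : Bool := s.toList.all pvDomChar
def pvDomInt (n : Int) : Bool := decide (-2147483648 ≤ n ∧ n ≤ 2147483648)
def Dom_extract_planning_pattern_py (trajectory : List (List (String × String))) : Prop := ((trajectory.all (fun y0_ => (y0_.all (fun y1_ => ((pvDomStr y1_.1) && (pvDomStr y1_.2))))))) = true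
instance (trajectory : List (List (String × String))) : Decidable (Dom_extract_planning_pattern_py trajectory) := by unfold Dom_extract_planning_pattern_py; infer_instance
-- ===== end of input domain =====

-- B is category-major: for each category in priority order it finds the index of the first step
-- that category claims, then sorts the claimed categories by that first index (objective: alternative algorithm).

-- ===== PORT A =====
-- one loop iteration of A: categorize the step's action through the elif chain, appending on first match if unseen
def pvAStep (acc : List String) (step : List (String × String)) : List String :=
  let action := PySem.Str.lower (PySem.Dict.getD (PySem.Dict.mk step) "action" "")
  if PySem.Str.isIn "go to" action || PySem.Str.isIn "navigate" action then
    if !acc.contains "Navigate" then acc ++ ["Navigate"] else acc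
  else if PySem.Str.isIn "take" action || PySem.Str.isIn "pick" action || PySem.Str.isIn "grab" action then
    if !acc.contains "Acquire" then acc ++ ["Acquire"] else acc
  else if PySem.Str.isIn "put" action || PySem.Str.isIn "place" action || PySem.Str.isIn "move" action then
    if !acc.contains "Place" then acc ++ ["Place"] else acc
  else if PySem.Str.isIn "open" action then
    if !acc.contains "Open" then acc ++ ["Open"] else acc
  else if PySem.Str.isIn "use" action || PySem.Str.isIn "turn on" action then
    if !acc.contains "Use" then acc ++ ["Use"] else acc
  else if PySem.Str.isIn "search" action || PySem.Str.isIn "look" action || PySem.Str.isIn "examine" action then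
    if !acc.contains "Search" then acc ++ ["Search"] else acc
  else acc

def extract_planning_pattern_py (trajectory : List (List (String × String))) : String :=
  let action_types := trajectory.foldl pvAStep []
  if !action_types.isEmpty then PySem.Str.join " → " action_types
  else "Unknown pattern"

-- ===== PORT B =====
-- the CATS table of Source B
def pvCats : List (String × List String) :=
  [ ("Navigate", ["go to", "navigate"]),
    ("Acquire", ["take", "pick", "grab"]),
    ("Place", ["put", "place", "move"]),
    ("Open", ["open"]),
    ("Use", ["use", "turn on"]),
    ("Search", ["search", "look", "examine"]) ]

-- inner loop of Source B: first (index, action) pair whose action matches kws but none of the earlier categories' keywords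
def pvFindFirst (pairs : List (Int × String)) (kws prior : List String) : Option Int :=
  match pairs with
  | [] => none
  | (i, a) :: rest =>
    if kws.any (fun k => PySem.Str.isIn k a) && !(prior.any (fun k => PySem.Str.isIn k a)) then some i
    else pvFindFirst rest kws prior

-- outer loop of Source B over CATS; 'prior' accumulates the keywords of CATS[:j]
def pvFirsts (cats : List (String × List String)) (prior : List String)
    (pairs : List (Int × String)) : List (Int × String) :=
  match cats with
  | [] => []
  | (name, kws) :: rest =>
    (match pvFindFirst pairs kws prior with
     | some i => [(i, name)]
     | none => []) ++ pvFirsts rest (prior ++ kws) pairs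

def extract_planning_pattern_py_alt (trajectory : List (List (String × String))) : String :=
  let actions := trajectory.map (fun step => PySem.Str.lower (PySem.Dict.getD (PySem.Dict.mk step) "action" ""))
  let firsts := pvFirsts pvCats [] (PySem.List.enumerate actions)
  if firsts.isEmpty then "Unknown pattern"
  else PySem.Str.join " → " ((PySem.List.sorted firsts (fun p => p.1) false).map (fun p => p.2))

-- ===== PRECONDITION & SPEC =====
def Spec_extract_planning_pattern_py (trajectory : List (List (String × String))) (out : String) : Prop := out = extract_planning_pattern_py_alt trajectory
instance (trajectory : List (List (String × String))) (out : String) : Decidable (Spec_extract_planning_pattern_py trajectory out) := by unfold Spec_extract_planning_pattern_py; infer_instance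

-- ===== CLAIM (what is proved, stated in full; the proofs are below) =====
def Claim_equal_extract_planning_pattern_py : Prop := ∀ (trajectory : List (List (String × String))), Dom_extract_planning_pattern_py trajectory → Spec_extract_planning_pattern_py trajectory (extract_planning_pattern_py trajectory)

-- ===== LEMMAS AND PROOFS =====

-- A's elif chain as a first-match scan over the same table (proof-side helper)
def pvScan (rules : List (String × List String)) (action : String) : Option String :=
  match rules with
  | [] => none
  | (name, kws) :: rest =>
    if kws.any (fun k => PySem.Str.isIn k action) then some name else pvScan rest action

def pvClassify (action : String) : Option String := pvScan pvCats action

-- the per-category accumulator update A's loop performs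
def pvGen (acc : List String) (c : Option String) : List String :=
  match c with
  | none => acc
  | some c => if !acc.contains c then acc ++ [c] else acc

def pvNames : List String := pvCats.map Prod.fst

lemma pvStep_eq (acc : List String) (step : List (String × String)) :
    pvAStep acc step = pvGen acc (pvClassify (PySem.Str.lower (PySem.Dict.getD (PySem.Dict.mk step) "action" ""))) := by
  simp only [pvAStep, pvClassify, pvCats, pvScan, pvGen, List.any_cons, List.any_nil, Bool.or_false]
  split_ifs <;> simp_all

lemma pvFoldA_eq (trajectory : List (List (String × String))) (acc : List String) :
    trajectory.foldl pvAStep acc =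
      (trajectory.map (fun step => pvClassify (PySem.Str.lower (PySem.Dict.getD (PySem.Dict.mk step) "action" "")))).foldl pvGen acc := by
  induction trajectory generalizing acc with
  | nil => rfl
  | cons s rest ih => simp only [List.foldl_cons, List.map_cons, pvStep_eq, ih]

-- first index (as Int) at which the classified list carries the given category
def pvIdx (cats : List (Option String)) (n : String) : Int :=
  (((List.findIdx? (fun c => c == some n) cats).getD cats.length : Nat) : Int)

lemma pvMem_foldGen (cats : List (Option String)) (acc : List String) (x : String) :
    x ∈ cats.foldl pvGen acc ↔ x ∈ acc ∨ (some x) ∈ cats := by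
  induction cats generalizing acc with
  | nil => simp
  | cons c rest ih =>
    cases c with
    | none => simpa [pvGen] using ih acc
    | some n =>
      simp only [List.foldl_cons, pvGen, List.mem_cons]
      by_cases h : n ∈ acc
      · rw [show (!acc.contains n) = false by simp [h]]
        simp only [Bool.false_eq_true, if_false, ih]
        constructor
        · rintro (hx | hx)
          · exact Or.inl hx
          · exact Or.inr (Or.inr hx)
        · rintro (hx | hx | hx)
          · exact Or.inl hx
          · cases hx; exact Or.inl h
          · exact Or.inr hx
      · rw [show (!acc.contains n) = true by simp [h]]
        simp only [if_true, ih, List.mem_append, List.mem_singleton]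
        constructor
        · rintro ((hx | hx) | hx)
          · exact Or.inl hx
          · exact Or.inr (Or.inl (by rw [hx]))
          · exact Or.inr (Or.inr hx)
        · rintro (hx | hx | hx)
          · exact Or.inl (Or.inl hx)
          · exact Or.inl (Or.inr (Option.some.inj hx))
          · exact Or.inr hx

lemma pvNodup_foldGen (cats : List (Option String)) (acc : List String) (h : acc.Nodup) :
    (cats.foldl pvGen acc).Nodup := by
  induction cats generalizing acc with
  | nil => exact h
  | cons c rest ih =>
    cases c with
    | none => exact ih acc h
    | some n =>
      simp only [List.foldl_cons, pvGen]
      by_cases hn : n ∈ acc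
      · rw [show (!acc.contains n) = false by simp [hn]]
        simp only [Bool.false_eq_true, if_false]
        exact ih acc h
      · rw [show (!acc.contains n) = true by simp [hn]]
        simp only [if_true]
        have hdisj : ∀ a ∈ acc, ∀ b ∈ [n], a ≠ b := by
          intro a ha b hb
          rw [List.mem_singleton] at hb
          subst hb
          exact fun hae => hn (hae ▸ ha)
        exact ih _ (List.nodup_append.mpr ⟨h, List.nodup_singleton n, hdisj⟩)

lemma pvIdx_append_of_mem (init : List (Option String)) (c : Option String) (x : String)
    (h : some x ∈ init) : pvIdx (init ++ [c]) x = pvIdx init x := by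
  have hsome : (List.findIdx? (fun c' => c' == some x) init).isSome := by
    rw [List.findIdx?_isSome]
    exact List.any_eq_true.mpr ⟨some x, h, by simp⟩
  obtain ⟨k, hk⟩ := Option.isSome_iff_exists.mp hsome
  simp [pvIdx, List.findIdx?_append, hk]

lemma pvIdx_lt_of_mem (init : List (Option String)) (x : String) (h : some x ∈ init) :
    pvIdx init x < (init.length : Int) := by
  have hsome : (List.findIdx? (fun c' => c' == some x) init).isSome := by
    rw [List.findIdx?_isSome]
    exact List.any_eq_true.mpr ⟨some x, h, by simp⟩
  obtain ⟨k, hk⟩ := Option.isSome_iff_exists.mp hsome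
  have hlt := (List.findIdx?_eq_some_iff_findIdx_eq.mp hk).1
  simp [pvIdx, hk]
  exact_mod_cast hlt

lemma pvPairwise_foldGen (cats : List (Option String)) :
    (cats.foldl pvGen []).Pairwise (fun x y => pvIdx cats x < pvIdx cats y) := by
  induction cats using List.reverseRecOn with
  | nil => simp
  | append_singleton init c ih =>
    rw [List.foldl_append]
    have htrans : (init.foldl pvGen []).Pairwise
        (fun x y => pvIdx (init ++ [c]) x < pvIdx (init ++ [c]) y) := by
      refine List.Pairwise.imp_of_mem ?_ ih
      intro a b ha hb hab
      have ha' : some a ∈ init := ((pvMem_foldGen init [] a).mp ha).resolve_left (by simp)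
      have hb' : some b ∈ init := ((pvMem_foldGen init [] b).mp hb).resolve_left (by simp)
      rw [pvIdx_append_of_mem _ _ _ ha', pvIdx_append_of_mem _ _ _ hb']
      exact hab
    cases c with
    | none => simpa [pvGen] using htrans
    | some n =>
      simp only [List.foldl_cons, List.foldl_nil, pvGen]
      by_cases hn : n ∈ init.foldl pvGen []
      · rw [show (!(init.foldl pvGen []).contains n) = false by simp [hn]]
        simpa only [Bool.false_eq_true, if_false] using htrans
      · rw [show (!(init.foldl pvGen []).contains n) = true by simp [hn]]
        simp only [if_true]
        rw [List.pairwise_append]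
        refine ⟨htrans, List.pairwise_singleton _ _, ?_⟩
        intro x hx y hy
        rw [List.mem_singleton] at hy
        rw [hy]
        have hx' : some x ∈ init := ((pvMem_foldGen init [] x).mp hx).resolve_left (by simp)
        have hnmem : some n ∉ init := fun hm =>
          hn ((pvMem_foldGen init [] n).mpr (Or.inr hm))
        have hnone : List.findIdx? (fun c' => c' == some n) init = none := by
          rw [List.findIdx?_eq_none_iff]
          intro z hz
          simp only [beq_eq_false_iff_ne, ne_eq]
          intro hzz; exact hnmem (hzz ▸ hz)
        have hidxn : pvIdx (init ++ [some n]) n = (init.length : Int) := by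
          simp [pvIdx, List.findIdx?_append, hnone]
        rw [pvIdx_append_of_mem _ _ _ hx', hidxn]
        exact lt_of_lt_of_le (pvIdx_lt_of_mem init x hx') (le_refl _)

lemma pvScan_mem (rules : List (String × List String)) (a n : String)
    (h : pvScan rules a = some n) : n ∈ rules.map Prod.fst := by
  induction rules with
  | nil => simp [pvScan] at h
  | cons r rest ih =>
    obtain ⟨m, kws⟩ := r
    simp only [pvScan] at h
    by_cases hc : (kws.any (fun k => PySem.Str.isIn k a)) = true
    · rw [if_pos hc] at h
      simp [Option.some.inj h]
    · rw [if_neg hc] at h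
      simp [ih h]

-- Source B's inner search equals the first index classified as that category
lemma pvFindFirst_eq_aux (actions : List String) (kws prior : List String) (name : String)
    (hcond : ∀ a, (kws.any (fun k => PySem.Str.isIn k a) && !(prior.any (fun k => PySem.Str.isIn k a)))
        = (pvClassify a == some name)) (s : Int) :
    pvFindFirst (PySem.List.enumerate actions s) kws prior
      = (List.findIdx? (fun c => c == some name) (actions.map pvClassify)).map (fun k => s + (k : Int)) := by
  induction actions generalizing s with
  | nil => simp [pvFindFirst, PySem.List.enumerate]
  | cons a rest ih =>
    rw [PySem.List.enumerate_cons]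
    simp only [pvFindFirst, List.map_cons, List.findIdx?_cons]
    rw [hcond a]
    by_cases h : pvClassify a = some name
    · simp [h]
    · rw [show (pvClassify a == some name) = false by simp [h]]
      simp only [Bool.false_eq_true, if_false, ih (s + 1)]
      cases hf : List.findIdx? (fun c => c == some name) (rest.map pvClassify) with
      | none => simp
      | some k => simp; omega

-- optional (first index, name) contribution of one category
def pvOptPair (cats : List (Option String)) (n : String) : List (Int × String) :=
  match List.findIdx? (fun c => c == some n) cats with
  | some k => [(((k : Nat) : Int), n)]
  | none => []

lemma pvRule_eq (actions : List String) (kws prior : List String) (name : String)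
    (hcond : ∀ a, (kws.any (fun k => PySem.Str.isIn k a) && !(prior.any (fun k => PySem.Str.isIn k a)))
        = (pvClassify a == some name)) :
    (match pvFindFirst (PySem.List.enumerate actions) kws prior with
     | some i => [(i, name)]
     | none => ([] : List (Int × String))) = pvOptPair (actions.map pvClassify) name := by
  rw [show PySem.List.enumerate actions = PySem.List.enumerate actions 0 from rfl,
    pvFindFirst_eq_aux actions kws prior name hcond 0]
  cases hf : List.findIdx? (fun c => c == some name) (actions.map pvClassify) with
  | none => simp [pvOptPair, hf]
  | some k => simp [pvOptPair, hf]

lemma pvFlatMap_filter (cats : List (Option String)) (ns : List String) :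
    ns.flatMap (pvOptPair cats)
      = (ns.filter (fun n => decide ((some n) ∈ cats))).map (fun n => (pvIdx cats n, n)) := by
  induction ns with
  | nil => rfl
  | cons n rest ih =>
    simp only [List.flatMap_cons, List.filter_cons]
    cases hf : List.findIdx? (fun c => c == some n) cats with
    | none =>
      have hmem : some n ∉ cats := by
        intro hm
        rw [List.findIdx?_eq_none_iff] at hf
        simpa using hf _ hm
      simp [pvOptPair, hf, hmem, ih]
    | some k =>
      have hmem : some n ∈ cats := by
        obtain ⟨hlt, hp, -⟩ := List.findIdx?_eq_some_iff_getElem.mp hf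
        have : cats[k] = some n := by simpa using hp
        exact this ▸ List.getElem_mem hlt
      have hidx : pvIdx cats n = ((k : Nat) : Int) := by simp [pvIdx, hf]
      simp [pvOptPair, hf, hmem, ih, hidx]

-- every classified category name is in the table
lemma pvName_of_mem (cats : List (Option String)) (actions : List String)
    (hc : cats = actions.map pvClassify) (x : String) (h : some x ∈ cats) : x ∈ pvNames := by
  subst hc
  obtain ⟨a, -, ha⟩ := List.mem_map.mp h
  exact pvScan_mem pvCats a x ha

-- the heart of the equivalence, over the list of (lowered) action strings
lemma pvCore (actions : List String) :
    (if !((actions.map pvClassify).foldl pvGen []).isEmpty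
     then PySem.Str.join " → " ((actions.map pvClassify).foldl pvGen [])
     else "Unknown pattern")
    = (if (pvFirsts pvCats [] (PySem.List.enumerate actions)).isEmpty then "Unknown pattern"
       else PySem.Str.join " → "
         ((PySem.List.sorted (pvFirsts pvCats [] (PySem.List.enumerate actions)) (fun p => p.1) false).map (fun p => p.2))) := by
  set cats : List (Option String) := actions.map pvClassify with hcats
  -- rewrite Source B's firsts into per-category contributions over the classified list
  have hfirsts : pvFirsts pvCats [] (PySem.List.enumerate actions)
      = pvNames.flatMap (pvOptPair cats) := by
    simp only [pvFirsts, pvCats, pvNames, List.map_cons, List.map_nil, List.flatMap_cons,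
      List.flatMap_nil, List.nil_append, List.cons_append, List.append_nil]
    rw [pvRule_eq actions _ _ "Navigate" (by
          intro a
          simp only [pvClassify, pvCats, pvScan, List.any_cons, List.any_nil, Bool.or_false]
          split_ifs <;> simp_all <;> (intros; simp_all)),
        pvRule_eq actions _ _ "Acquire" (by
          intro a
          simp only [pvClassify, pvCats, pvScan, List.any_cons, List.any_nil, Bool.or_false]
          split_ifs <;> simp_all <;> (intros; simp_all)),
        pvRule_eq actions _ _ "Place" (by
          intro a
          simp only [pvClassify, pvCats, pvScan, List.any_cons, List.any_nil, Bool.or_false]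
          split_ifs <;> simp_all <;> (intros; simp_all)),
        pvRule_eq actions _ _ "Open" (by
          intro a
          simp only [pvClassify, pvCats, pvScan, List.any_cons, List.any_nil, Bool.or_false]
          split_ifs <;> simp_all <;> (intros; simp_all)),
        pvRule_eq actions _ _ "Use" (by
          intro a
          simp only [pvClassify, pvCats, pvScan, List.any_cons, List.any_nil, Bool.or_false]
          split_ifs <;> simp_all <;> (intros; simp_all)),
        pvRule_eq actions _ _ "Search" (by
          intro a
          simp only [pvClassify, pvCats, pvScan, List.any_cons, List.any_nil, Bool.or_false]
          split_ifs <;> simp_all <;> (intros; simp_all))]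
  set D := cats.foldl pvGen [] with hD
  have hnodupD : D.Nodup := pvNodup_foldGen cats [] List.nodup_nil
  have hnodupF : (pvNames.filter (fun n => decide ((some n) ∈ cats))).Nodup :=
    List.Nodup.filter _ (by decide)
  have hperm : (pvNames.filter (fun n => decide ((some n) ∈ cats))).Perm D := by
    rw [List.perm_ext_iff_of_nodup hnodupF hnodupD]
    intro x
    simp only [List.mem_filter, decide_eq_true_eq, hD, pvMem_foldGen, List.not_mem_nil,
      false_or]
    exact ⟨fun h => h.2, fun h => ⟨pvName_of_mem cats actions hcats x h, h⟩⟩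
  have hys : (D.map (fun n => (pvIdx cats n, n))).Perm (pvNames.flatMap (pvOptPair cats)) := by
    rw [pvFlatMap_filter]
    exact (hperm.map _).symm
  have hpw : (D.map (fun n => (pvIdx cats n, n))).Pairwise
      (fun p q : Int × String => (fun p : Int × String => p.1) p < (fun p : Int × String => p.1) q) := by
    rw [List.pairwise_map]
    exact pvPairwise_foldGen cats
  have hsorted : PySem.List.sorted (pvNames.flatMap (pvOptPair cats)) (fun p => p.1) false
      = D.map (fun n => (pvIdx cats n, n)) :=
    PySem.List.sorted_eq_of_perm_of_pairwise_lt _ _ _ hys hpw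
  have hlen : (pvNames.flatMap (pvOptPair cats)).length = D.length := by
    rw [hys.symm.length_eq, List.length_map]
  rw [hfirsts, hsorted]
  have hsnd : (D.map (fun n => (pvIdx cats n, n))).map (fun p => p.2) = D := by
    simp [Function.comp_def]
  rw [hsnd]
  by_cases hDe : D.isEmpty
  · rw [show (pvNames.flatMap (pvOptPair cats)).isEmpty = true by
        rw [List.isEmpty_iff_length_eq_zero, hlen]
        exact List.isEmpty_iff_length_eq_zero.mp hDe]
    rw [show (!D.isEmpty) = false by simp [hDe]]
    simp
  · rw [show (pvNames.flatMap (pvOptPair cats)).isEmpty = false by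
        rw [Bool.eq_false_iff]
        intro hc
        exact hDe (List.isEmpty_iff_length_eq_zero.mpr (hlen ▸ List.isEmpty_iff_length_eq_zero.mp hc))]
    rw [show (!D.isEmpty) = true by simp [Bool.eq_false_iff.mpr hDe]]
    simp

-- ===== VERDICT (by name: the statement is the Claim_ definition above) =====
theorem extract_planning_pattern_py_spec : Claim_equal_extract_planning_pattern_py := by
  intro traj _
  unfold Spec_extract_planning_pattern_py extract_planning_pattern_py extract_planning_pattern_py_alt
  simp only []
  rw [pvFoldA_eq]
  have hmapeq : traj.map (fun step => pvClassify (PySem.Str.lower (PySem.Dict.getD (PySem.Dict.mk step) "action" "")))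
      = (traj.map (fun step => PySem.Str.lower (PySem.Dict.getD (PySem.Dict.mk step) "action" ""))).map pvClassify := by
    rw [List.map_map]; rfl
  rw [hmapeq]
  exact pvCore (traj.map (fun step => PySem.Str.lower (PySem.Dict.getD (PySem.Dict.mk step) "action" "")))
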